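-- pv_equiv track=rewrite | github.com/Daniel-PosadaPUJ/Competitive_Programming | universidad/estructuras_de_datos/tarea 1 - 3/tarea1.py | obtenerSumaFilaColumna
-- ===== SOURCE A (Python) =====
-- def obtenerSumaFilaColumna( mat ):
--    numLista = []
--    n = len( mat )
--    i, j = 0, 0
--
--
--    for j in range( n ) :
--       sumTempColum, sumTempFila = 0, 0
--       for i in range( n ):
--         sumTempFila = sumTempFila + mat[j][i]
--         sumTempColum = sumTempColum + mat[i][j]
--
--       numLista.append( sumTempColum + sumTempFila - mat[j][j] )
--
--    return numLista
-- ===== SOURCE B (Python) =====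
-- def obtenerSumaFilaColumna(mat):
--     n = len(mat)
--     col_sums = [0] * n
--     for row in mat:
--         col_sums = [c + v for c, v in zip(col_sums, row)]
--     return [sum(row[:n]) + col_sums[j] - row[j]
--             for j, row in enumerate(mat)]
-- ===== Notes on version B (the rewrite author's own statement) =====
-- stated objective: alternative
-- what changed: Replaces A's fused per-index double loop (re-scanning row and column for every output index with per-element indexing) with a single pass that builds the full column-sum table by zipping rows, then combines each row's sum over its first n entries, its column sum and the diagonal element per index.
import Mathlib
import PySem

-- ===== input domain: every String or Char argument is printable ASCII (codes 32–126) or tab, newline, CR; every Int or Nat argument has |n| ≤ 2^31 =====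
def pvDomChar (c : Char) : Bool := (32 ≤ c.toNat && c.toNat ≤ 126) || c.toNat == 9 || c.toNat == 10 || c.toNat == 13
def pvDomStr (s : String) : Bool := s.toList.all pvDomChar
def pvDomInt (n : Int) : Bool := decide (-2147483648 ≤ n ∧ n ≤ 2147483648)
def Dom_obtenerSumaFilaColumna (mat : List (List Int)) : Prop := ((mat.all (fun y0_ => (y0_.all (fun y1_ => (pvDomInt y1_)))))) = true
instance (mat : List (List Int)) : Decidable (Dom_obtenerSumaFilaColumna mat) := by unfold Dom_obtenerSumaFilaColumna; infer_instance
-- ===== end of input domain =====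

-- B builds the column-sum table in one pass over the rows (zipping), then combines
-- row sum, column sum and diagonal per index, instead of A's fused per-index double loop.

-- ===== PORT A =====
def obtenerSumaFilaColumna (mat : List (List Int)) : List Int :=
  let n : Int := mat.length
  (PySem.List.pyRange 0 n 1).foldl (fun numLista j =>
    let p := (PySem.List.pyRange 0 n 1).foldl
      (fun (p : Int × Int) i =>
        (p.1 + PySem.List.pyGetD (PySem.List.pyGetD mat i []) j 0,
         p.2 + PySem.List.pyGetD (PySem.List.pyGetD mat j []) i 0))
      (0, 0)
    numLista ++ [p.1 + p.2 - PySem.List.pyGetD (PySem.List.pyGetD mat j []) j 0]) []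

-- ===== PORT B =====
def obtenerSumaFilaColumna_alt (mat : List (List Int)) : List Int :=
  let n : Nat := mat.length
  let colSums := mat.foldl (fun acc row => acc.zipWith (· + ·) row) (List.replicate n (0 : Int))
  (PySem.List.enumerate mat).map (fun p =>
    (PySem.List.slice p.2 none (some (n : Int))).sum
      + PySem.List.pyGetD colSums p.1 0
      - PySem.List.pyGetD p.2 p.1 0)

-- ===== PRECONDITION & SPEC =====
-- Pre_ excludes ragged matrices with a row shorter than len(mat): there Python A raises IndexError.
def Pre_obtenerSumaFilaColumna (mat : List (List Int)) : Prop :=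
  ∀ r ∈ mat, mat.length ≤ r.length
instance (mat : List (List Int)) : Decidable (Pre_obtenerSumaFilaColumna mat) := by
  unfold Pre_obtenerSumaFilaColumna; infer_instance
def pvWitness_obtenerSumaFilaColumna : List (List Int) := [[1, 2], [3, 4]]
def Spec_obtenerSumaFilaColumna (mat : List (List Int)) (out : List Int) : Prop := out = obtenerSumaFilaColumna_alt mat
instance (mat : List (List Int)) (out : List Int) : Decidable (Spec_obtenerSumaFilaColumna mat out) := by unfold Spec_obtenerSumaFilaColumna; infer_instance

-- ===== CLAIM (what is proved, stated in full; the proofs are below) =====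
def Claim_equal_obtenerSumaFilaColumna : Prop := ∀ (mat : List (List Int)), Dom_obtenerSumaFilaColumna mat → Pre_obtenerSumaFilaColumna mat → Spec_obtenerSumaFilaColumna mat (obtenerSumaFilaColumna mat)

-- ===== LEMMAS AND PROOFS =====

-- the matrix entry at row a, column b (default 0; in range under Pre_)
def pvG (mat : List (List Int)) (a b : Nat) : Int := (mat.getD a []).getD b 0

theorem pv_range_nat (n : Nat) :
    PySem.List.pyRange 0 (n : Int) 1 = List.map (fun k : Nat => (k : Int)) (List.range n) := by
  rw [PySem.List.pyRange_one]
  simp only [Int.sub_zero, Int.toNat_natCast, zero_add]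

theorem pv_inner (mat : List (List Int)) (j : Int) :
    (PySem.List.pyRange 0 (mat.length : Int) 1).foldl
      (fun (p : Int × Int) i =>
        (p.1 + PySem.List.pyGetD (PySem.List.pyGetD mat i []) j 0,
         p.2 + PySem.List.pyGetD (PySem.List.pyGetD mat j []) i 0)) (0, 0)
    = (((List.range mat.length).map (fun i => PySem.List.pyGetD (mat.getD i []) j 0)).sum,
       ((List.range mat.length).map (fun i => (PySem.List.pyGetD mat j []).getD i 0)).sum) := by
  rw [PySem.List.foldl_prod_mk
        (f := fun acc i => acc + PySem.List.pyGetD (PySem.List.pyGetD mat i []) j 0)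
        (g := fun acc i => acc + PySem.List.pyGetD (PySem.List.pyGetD mat j []) i 0),
      PySem.List.foldl_add, PySem.List.foldl_add, pv_range_nat, List.map_map, List.map_map]
  simp only [Function.comp_def, PySem.List.pyGetD_natCast, zero_add]

theorem pv_A_closed (mat : List (List Int)) :
    obtenerSumaFilaColumna mat =
      (List.range mat.length).map (fun j =>
        ((List.range mat.length).map (fun i => pvG mat i j)).sum
        + ((List.range mat.length).map (fun i => pvG mat j i)).sum
        - pvG mat j j) := by
  unfold obtenerSumaFilaColumna
  simp only [pv_inner]
  simp only [PySem.List.foldl_append_singleton_eq_map, List.nil_append, pv_range_nat,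
    List.map_map]
  refine List.map_congr_left ?_
  intro j _
  simp only [Function.comp_def, PySem.List.pyGetD_natCast, pvG]

theorem pv_colfold_getD (rows : List (List Int)) (acc : List Int) (k : Nat)
    (h : ∀ r ∈ rows, acc.length ≤ r.length) (hk : k < acc.length) :
    (rows.foldl (fun a r => a.zipWith (· + ·) r) acc).getD k 0
      = acc.getD k 0 + (rows.map (fun r => r.getD k 0)).sum := by
  induction rows generalizing acc with
  | nil => simp
  | cons r rows ih =>
    have hr : acc.length ≤ r.length := h r (by simp)
    have hlen : (acc.zipWith (· + ·) r).length = acc.length := by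
      rw [List.length_zipWith]; exact Nat.min_eq_left hr
    have hzip : (acc.zipWith (· + ·) r).getD k 0 = acc.getD k 0 + r.getD k 0 := by
      rw [List.getD_eq_getElem _ _ (by rw [hlen]; exact hk), List.getElem_zipWith,
        List.getD_eq_getElem _ _ hk, List.getD_eq_getElem _ _ (lt_of_lt_of_le hk hr)]
    rw [List.foldl_cons, ih _ (by intro r' hr'; rw [hlen]; exact h r' (by simp [hr']))
        (by rw [hlen]; exact hk), hzip]
    simp [add_assoc]

theorem pv_take_eq_map_range (row : List Int) (n : Nat) (h : n ≤ row.length) :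
    row.take n = (List.range n).map (fun i => row.getD i 0) := by
  apply List.ext_getElem
  · simp [h]
  · intro i h1 h2
    simp only [List.getElem_take, List.getElem_map, List.getElem_range]
    rw [List.getD_eq_getElem _ _ (by simp at h1; omega)]

theorem pv_map_rows (mat : List (List Int)) (j : Nat) :
    mat.map (fun r => r.getD j 0) = (List.range mat.length).map (fun i => pvG mat i j) := by
  apply List.ext_getElem
  · simp
  · intro i h1 h2
    simp only [List.getElem_map, List.getElem_range, pvG]
    rw [List.getD_eq_getElem mat [] (by simpa using h1)]

theorem pv_B_closed (mat : List (List Int))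
    (hpre : ∀ r ∈ mat, mat.length ≤ r.length) :
    obtenerSumaFilaColumna_alt mat =
      (List.range mat.length).map (fun j =>
        ((mat.getD j []).take mat.length).sum
        + (mat.map (fun r => r.getD j 0)).sum
        - pvG mat j j) := by
  unfold obtenerSumaFilaColumna_alt
  rw [PySem.List.enumerate_eq_map_pyRange (d := []), List.map_map]
  simp only [PySem.List.len, pv_range_nat, List.map_map]
  refine List.map_congr_left ?_
  intro j hj
  rw [List.mem_range] at hj
  have hrep : ∀ r ∈ mat, (List.replicate mat.length (0 : Int)).length ≤ r.length := by
    intro r hr; simpa using hpre r hr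
  simp only [Function.comp_def, PySem.List.pyGetD_natCast, PySem.List.slice_to_natCast]
  rw [pv_colfold_getD mat _ j hrep (by simpa using hj)]
  have h0 : (List.replicate mat.length (0 : Int)).getD j 0 = 0 := by
    rw [List.getD_eq_getElem _ _ (by simpa using hj), List.getElem_replicate]
  rw [h0, zero_add]
  simp only [pvG]

-- ===== VERDICT (by name: the statement is the Claim_ definition above) =====
theorem obtenerSumaFilaColumna_spec : Claim_equal_obtenerSumaFilaColumna := by
  intro mat _ hpre
  unfold Spec_obtenerSumaFilaColumna
  rw [pv_A_closed, pv_B_closed mat hpre]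
  refine List.map_congr_left ?_
  intro j hj
  rw [List.mem_range] at hj
  have hmem : mat.getD j [] ∈ mat := by
    rw [List.getD_eq_getElem mat [] hj]; exact List.getElem_mem hj
  rw [pv_take_eq_map_range _ _ (hpre _ hmem), pv_map_rows]
  simp only [pvG]
  ring
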